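-- pv_equiv track=rewrite | github.com/nvmmonsalud/ai-coach | src/ai_coach/recommendations.py | _prioritize_resources
-- ===== SOURCE A (Python) =====
-- from typing import Dict, List
--
-- RESOURCE_PRIORITY = ["course", "reading", "project"]
--
-- def _prioritize_resources(resources: Dict[str, List[Dict]]) -> List[Dict]:
--     prioritized: List[Dict] = []
--     for resource_type in ("quick_wins", "medium_term", "interview_prep"):
--         bucket = resources.get(resource_type, [])
--         sorted_bucket = sorted(
--             bucket,
--             key=lambda item: RESOURCE_PRIORITY.index(item.get("resource_type", "reading"))
--             if item.get("resource_type", "reading") in RESOURCE_PRIORITY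
--             else len(RESOURCE_PRIORITY),
--         )
--         prioritized.extend(sorted_bucket)
--     return prioritized
-- ===== SOURCE B (Python) =====
-- PRIORITY_LEVEL = {"course": 0, "reading": 1, "project": 2}
--
-- def _prioritize_resources(resources):
--     prioritized = []
--     for resource_type in ("quick_wins", "medium_term", "interview_prep"):
--         levels = ([], [], [], [])
--         for item in resources.get(resource_type, []):
--             levels[PRIORITY_LEVEL.get(item.get("resource_type", "reading"), 3)].append(item)
--         for level in levels:
--             prioritized.extend(level)
--     return prioritized
-- ===== Notes on version B (the rewrite author's own statement) =====
-- stated objective: alternative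
-- what changed: Replaces the per-bucket stable sort by a single-pass bucket distribution into four priority-level lists concatenated in ascending order, removing the sort entirely.
import Mathlib
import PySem

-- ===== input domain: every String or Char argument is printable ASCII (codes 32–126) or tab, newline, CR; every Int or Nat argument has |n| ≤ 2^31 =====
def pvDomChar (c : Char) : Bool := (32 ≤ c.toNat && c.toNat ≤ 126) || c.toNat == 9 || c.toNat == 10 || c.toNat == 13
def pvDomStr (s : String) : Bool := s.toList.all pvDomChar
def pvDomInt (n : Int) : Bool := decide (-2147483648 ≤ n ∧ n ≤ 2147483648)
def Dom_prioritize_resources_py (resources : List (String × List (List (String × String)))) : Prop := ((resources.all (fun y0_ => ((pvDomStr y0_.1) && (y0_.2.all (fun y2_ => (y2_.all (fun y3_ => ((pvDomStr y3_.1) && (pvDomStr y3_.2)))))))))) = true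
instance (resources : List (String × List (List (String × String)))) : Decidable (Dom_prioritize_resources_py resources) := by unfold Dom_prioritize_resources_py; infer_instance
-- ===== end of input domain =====

set_option maxRecDepth 8000

-- B replaces A's per-bucket stable sort by a one-pass distribution into four priority-level
-- lists concatenated in ascending order (objective: alternative algorithm, no sort).

-- ===== PORT A =====
def RESOURCE_PRIORITY : List String := ["course", "reading", "project"]

-- the sort key of A: RESOURCE_PRIORITY.index(t) if t in RESOURCE_PRIORITY else len(RESOURCE_PRIORITY)
def pvKeyA (item : List (String × String)) : Int :=
  let t := (PySem.Dict.mk item).getD "resource_type" "reading"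
  if RESOURCE_PRIORITY.contains t then
    (((PySem.List.index? RESOURCE_PRIORITY t).getD 0 : Nat) : Int)
  else (RESOURCE_PRIORITY.length : Int)

def prioritize_resources_py (resources : List (String × List (List (String × String)))) : List (List (String × String)) :=
  (["quick_wins", "medium_term", "interview_prep"]).foldl
    (fun prioritized resource_type =>
      let bucket := (PySem.Dict.mk resources).getD resource_type []
      prioritized ++ PySem.List.sorted bucket pvKeyA) []

-- ===== PORT B =====
def PRIORITY_LEVEL : PySem.Dict String Int :=
  PySem.Dict.mk [("course", 0), ("reading", 1), ("project", 2)]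

-- PRIORITY_LEVEL.get(item.get("resource_type", "reading"), 3)
def pvLevelIdx (item : List (String × String)) : Int :=
  PRIORITY_LEVEL.getD ((PySem.Dict.mk item).getD "resource_type" "reading") 3

-- the inner loop of B: distribute the bucket items over the four level lists
def pvDistribute (bucket : List (List (String × String))) :
    List (List (String × String)) × List (List (String × String)) × List (List (String × String)) × List (List (String × String)) :=
  bucket.foldl (fun ls item =>
    let i := pvLevelIdx item
    if i = 0 then (ls.1 ++ [item], ls.2.1, ls.2.2.1, ls.2.2.2)
    else if i = 1 then (ls.1, ls.2.1 ++ [item], ls.2.2.1, ls.2.2.2)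
    else if i = 2 then (ls.1, ls.2.1, ls.2.2.1 ++ [item], ls.2.2.2)
    else (ls.1, ls.2.1, ls.2.2.1, ls.2.2.2 ++ [item])) ([], [], [], [])

def prioritize_resources_py_alt (resources : List (String × List (List (String × String)))) : List (List (String × String)) :=
  (["quick_wins", "medium_term", "interview_prep"]).foldl
    (fun prioritized resource_type =>
      let ls := pvDistribute ((PySem.Dict.mk resources).getD resource_type [])
      prioritized ++ ls.1 ++ ls.2.1 ++ ls.2.2.1 ++ ls.2.2.2) []

-- ===== PRECONDITION & SPEC =====
def Spec_prioritize_resources_py (resources : List (String × List (List (String × String)))) (out : List (List (String × String))) : Prop := out = prioritize_resources_py_alt resources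
instance (resources : List (String × List (List (String × String)))) (out : List (List (String × String))) : Decidable (Spec_prioritize_resources_py resources out) := by unfold Spec_prioritize_resources_py; infer_instance

-- ===== CLAIM (what is proved, stated in full; the proofs are below) =====
def Claim_equal_prioritize_resources_py : Prop := ∀ (resources : List (String × List (List (String × String)))), Dom_prioritize_resources_py resources → Spec_prioritize_resources_py resources (prioritize_resources_py resources)

-- ===== LEMMAS AND PROOFS =====

-- A's key and B's level index agree
theorem pvLevel_str (t : String) :
    PRIORITY_LEVEL.getD t 3 =
      (if RESOURCE_PRIORITY.contains t then
        (((PySem.List.index? RESOURCE_PRIORITY t).getD 0 : Nat) : Int)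
      else (RESOURCE_PRIORITY.length : Int)) := by
  by_cases h1 : t = "course"
  · subst h1; decide
  · by_cases h2 : t = "reading"
    · subst h2; decide
    · by_cases h3 : t = "project"
      · subst h3; decide
      · have hc : RESOURCE_PRIORITY.contains t = false := by
          simp [RESOURCE_PRIORITY, List.contains_eq_mem, h1, h2, h3]
        rw [hc]
        have e1 : ("course" == t) = false := beq_eq_false_iff_ne.mpr (Ne.symm h1)
        have e2 : ("reading" == t) = false := beq_eq_false_iff_ne.mpr (Ne.symm h2)
        have e3 : ("project" == t) = false := beq_eq_false_iff_ne.mpr (Ne.symm h3)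
        simp [PRIORITY_LEVEL, PySem.Dict.getD, PySem.Dict.get?, List.find?,
          e1, e2, e3, RESOURCE_PRIORITY]

theorem pvKey_eq (item : List (String × String)) : pvKeyA item = pvLevelIdx item := by
  unfold pvKeyA pvLevelIdx
  rw [pvLevel_str]

theorem pvLevel_range_str (t : String) :
    PRIORITY_LEVEL.getD t 3 = 0 ∨ PRIORITY_LEVEL.getD t 3 = 1 ∨
    PRIORITY_LEVEL.getD t 3 = 2 ∨ PRIORITY_LEVEL.getD t 3 = 3 := by
  by_cases h1 : t = "course"
  · subst h1; decide
  · by_cases h2 : t = "reading"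
    · subst h2; decide
    · by_cases h3 : t = "project"
      · subst h3; decide
      · have e1 : ("course" == t) = false := beq_eq_false_iff_ne.mpr (Ne.symm h1)
        have e2 : ("reading" == t) = false := beq_eq_false_iff_ne.mpr (Ne.symm h2)
        have e3 : ("project" == t) = false := beq_eq_false_iff_ne.mpr (Ne.symm h3)
        simp [PRIORITY_LEVEL, PySem.Dict.getD, PySem.Dict.get?, List.find?, e1, e2, e3]

theorem pvKey_range (item : List (String × String)) :
    pvKeyA item = 0 ∨ pvKeyA item = 1 ∨ pvKeyA item = 2 ∨ pvKeyA item = 3 := by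
  rw [pvKey_eq]
  exact pvLevel_range_str _

theorem insertBy_append_left {α : Type} (before : α → α → Bool) (x : α) (l r : List α)
    (h : ∀ y ∈ l, before x y = false) :
    PySem.List.insertBy before x (l ++ r) = l ++ PySem.List.insertBy before x r := by
  induction l with
  | nil => simp
  | cons a t ih =>
      have ha : before x a = false := h a (List.mem_cons_self ..)
      simp only [List.cons_append, PySem.List.insertBy, ha]
      simp only [Bool.false_eq_true, if_false, List.cons.injEq, true_and]
      exact ih (fun y hy => h y (List.mem_cons_of_mem _ hy))

theorem insertBy_all_true {α : Type} (before : α → α → Bool) (x : α) (r : List α)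
    (h : ∀ y ∈ r, before x y = true) :
    PySem.List.insertBy before x r = x :: r := by
  cases r with
  | nil => simp [PySem.List.insertBy]
  | cons a t => simp [PySem.List.insertBy, h a (List.mem_cons_self ..)]

-- stable sort with keys in {0,1,2,3} = concatenation of the key-level filters
theorem sorted_eq_filters {α : Type} (key : α → Int)
    (hk : ∀ a, key a = 0 ∨ key a = 1 ∨ key a = 2 ∨ key a = 3) (xs : List α) :
    PySem.List.sorted xs key =
      xs.filter (fun a => key a == 0) ++ xs.filter (fun a => key a == 1) ++
      xs.filter (fun a => key a == 2) ++ xs.filter (fun a => key a == 3) := by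
  induction xs using List.reverseRecOn with
  | nil => simp [PySem.List.sorted]
  | append_singleton xs x ih =>
      have hstep : PySem.List.sorted (xs ++ [x]) key =
          PySem.List.insertBy (fun a b => decide (key a < key b)) x (PySem.List.sorted xs key) := by
        rw [PySem.List.sorted_eq_foldl_insertBy, PySem.List.sorted_eq_foldl_insertBy,
          List.foldl_append]
        rfl
      rw [hstep, ih]
      have hf := fun (j : Int) (y : α) (hy : y ∈ xs.filter (fun a => key a == j)) =>
        (eq_of_beq ((List.mem_filter.mp hy).2) : key y = j)
      rcases hk x with hx | hx | hx | hx
      · -- key x = 0 : goes to the end of level 0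
        have : PySem.List.insertBy (fun a b => decide (key a < key b)) x
            (xs.filter (fun a => key a == 0) ++ (xs.filter (fun a => key a == 1) ++
             xs.filter (fun a => key a == 2) ++ xs.filter (fun a => key a == 3))) =
            xs.filter (fun a => key a == 0) ++ (x :: (xs.filter (fun a => key a == 1) ++
             xs.filter (fun a => key a == 2) ++ xs.filter (fun a => key a == 3))) := by
          rw [insertBy_append_left]
          · rw [insertBy_all_true]
            intro y hy
            simp only [List.mem_append] at hy
            rcases hy with (hy | hy) | hy
            · have := hf 1 y hy; simp [hx, this]
            · have := hf 2 y hy; simp [hx, this]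
            · have := hf 3 y hy; simp [hx, this]
          · intro y hy
            have := hf 0 y hy; simp [hx, this]
        simp only [List.append_assoc] at this ⊢
        rw [this]
        simp [List.filter_append, hx]
      · -- key x = 1
        have : PySem.List.insertBy (fun a b => decide (key a < key b)) x
            ((xs.filter (fun a => key a == 0) ++ xs.filter (fun a => key a == 1)) ++
             (xs.filter (fun a => key a == 2) ++ xs.filter (fun a => key a == 3))) =
            (xs.filter (fun a => key a == 0) ++ xs.filter (fun a => key a == 1)) ++
             (x :: (xs.filter (fun a => key a == 2) ++ xs.filter (fun a => key a == 3))) := by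
          rw [insertBy_append_left]
          · rw [insertBy_all_true]
            intro y hy
            simp only [List.mem_append] at hy
            rcases hy with hy | hy
            · have := hf 2 y hy; simp [hx, this]
            · have := hf 3 y hy; simp [hx, this]
          · intro y hy
            simp only [List.mem_append] at hy
            rcases hy with hy | hy
            · have := hf 0 y hy; simp [hx, this]
            · have := hf 1 y hy; simp [hx, this]
        simp only [List.append_assoc] at this ⊢
        rw [this]
        simp [List.filter_append, hx]
      · -- key x = 2
        have : PySem.List.insertBy (fun a b => decide (key a < key b)) x
            ((xs.filter (fun a => key a == 0) ++ xs.filter (fun a => key a == 1) ++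
              xs.filter (fun a => key a == 2)) ++ xs.filter (fun a => key a == 3)) =
            (xs.filter (fun a => key a == 0) ++ xs.filter (fun a => key a == 1) ++
              xs.filter (fun a => key a == 2)) ++
             (x :: xs.filter (fun a => key a == 3)) := by
          rw [insertBy_append_left]
          · rw [insertBy_all_true]
            intro y hy
            have := hf 3 y hy; simp [hx, this]
          · intro y hy
            simp only [List.mem_append] at hy
            rcases hy with (hy | hy) | hy
            · have := hf 0 y hy; simp [hx, this]
            · have := hf 1 y hy; simp [hx, this]
            · have := hf 2 y hy; simp [hx, this]
        simp only [List.append_assoc] at this ⊢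
        rw [this]
        simp [List.filter_append, hx]
      · -- key x = 3 : goes to the very end
        rw [PySem.List.insertBy_of_forall_not_before]
        · simp [List.filter_append, hx]
        · intro y hy
          simp only [List.mem_append] at hy
          rcases hy with ((hy | hy) | hy) | hy
          · have := hf 0 y hy; simp [hx, this]
          · have := hf 1 y hy; simp [hx, this]
          · have := hf 2 y hy; simp [hx, this]
          · have := hf 3 y hy; simp [hx, this]

-- B's distribution loop computes the four level filters (generalized accumulator)
theorem pvDistribute_go (bucket : List (List (String × String)))
    (a b c d : List (List (String × String))) :
    bucket.foldl (fun ls item =>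
      let i := pvLevelIdx item
      if i = 0 then (ls.1 ++ [item], ls.2.1, ls.2.2.1, ls.2.2.2)
      else if i = 1 then (ls.1, ls.2.1 ++ [item], ls.2.2.1, ls.2.2.2)
      else if i = 2 then (ls.1, ls.2.1, ls.2.2.1 ++ [item], ls.2.2.2)
      else (ls.1, ls.2.1, ls.2.2.1, ls.2.2.2 ++ [item])) (a, b, c, d) =
    (a ++ bucket.filter (fun x => pvLevelIdx x == 0),
     b ++ bucket.filter (fun x => pvLevelIdx x == 1),
     c ++ bucket.filter (fun x => pvLevelIdx x == 2),
     d ++ bucket.filter (fun x => pvLevelIdx x == 3)) := by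
  induction bucket generalizing a b c d with
  | nil => simp
  | cons x t ih =>
      rcases pvKey_range x with hx | hx | hx | hx <;> rw [pvKey_eq] at hx <;>
        simp [List.foldl_cons, hx, ih]

-- per-bucket agreement of the two programs
theorem bucket_eq (bucket : List (List (String × String))) :
    PySem.List.sorted bucket pvKeyA =
      (pvDistribute bucket).1 ++ (pvDistribute bucket).2.1 ++
      (pvDistribute bucket).2.2.1 ++ (pvDistribute bucket).2.2.2 := by
  unfold pvDistribute
  rw [pvDistribute_go, sorted_eq_filters pvKeyA pvKey_range]
  have hfilter : ∀ j : Int, bucket.filter (fun a => pvKeyA a == j) =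
      bucket.filter (fun x => pvLevelIdx x == j) :=
    fun j => List.filter_congr (fun x _ => by rw [pvKey_eq])
  rw [hfilter 0, hfilter 1, hfilter 2, hfilter 3]
  simp

-- ===== VERDICT (by name: the statement is the Claim_ definition above) =====
theorem prioritize_resources_py_spec : Claim_equal_prioritize_resources_py := by
  intro resources _
  unfold Spec_prioritize_resources_py prioritize_resources_py prioritize_resources_py_alt
  simp only [List.foldl_cons, List.foldl_nil, bucket_eq, List.append_assoc, List.nil_append]
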